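-- pv_equiv track=rewrite | github.com/AB-2304/AB-2304 | yahtzee2.py | num_of_a_kind
-- ===== SOURCE A (Python) =====
-- from collections import Counter
--
-- def num_of_a_kind(roll: tuple, number: int) -> int:
--     """
--     If a roll has EXACTLY `number` dice of the same face value,
--     returns the sum of all five values in the roll.
--     Otherwise, returns 0.
--     """
--     Total = 0
--     c=Counter(roll)  # counts the frequency of elements in roll
--     counts = set(c.values())  # makes a set with frequency values
--     # iterate over the set to check whether frequency is equal to number
--     for i in counts:
--         if i == number:
--             # iterates over roll to add all values in the tuple
--             for num in roll:
--                 Total += num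
--     return Total
-- ===== SOURCE B (Python) =====
-- def num_of_a_kind(roll: tuple, number: int) -> int:
--     """
--     Returns sum(roll) if some face occurs exactly `number` times, else 0.
--     Sorts the roll and walks consecutive equal runs by index; each face's
--     multiplicity is a run length (no frequency table).
--     """
--     s = sorted(roll)
--     i = 0
--     while i < len(s):
--         j = i + 1
--         while j < len(s) and s[j] == s[i]:
--             j += 1
--         if j - i == number:
--             return sum(roll)
--         i = j
--     return 0
-- ===== Notes on version B (the rewrite author's own statement) =====
-- stated objective: alternative
-- what changed: Derives each face's multiplicity as a run length by sorting the roll and walking consecutive equal runs, instead of building a Counter hash table and iterating over the set of its values; trades the hash table for a sort.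
import Mathlib
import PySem

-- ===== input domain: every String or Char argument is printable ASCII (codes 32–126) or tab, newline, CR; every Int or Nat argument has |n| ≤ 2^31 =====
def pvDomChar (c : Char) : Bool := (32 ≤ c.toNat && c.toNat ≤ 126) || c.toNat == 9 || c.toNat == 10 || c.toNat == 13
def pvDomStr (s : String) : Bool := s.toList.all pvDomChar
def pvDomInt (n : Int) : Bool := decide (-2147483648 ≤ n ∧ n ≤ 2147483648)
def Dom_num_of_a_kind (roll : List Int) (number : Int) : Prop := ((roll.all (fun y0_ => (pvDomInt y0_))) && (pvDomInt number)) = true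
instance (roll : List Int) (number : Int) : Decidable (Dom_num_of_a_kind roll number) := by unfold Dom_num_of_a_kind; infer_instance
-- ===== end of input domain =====

-- B replaces A's Counter/set-of-values machinery by sorting the roll and walking consecutive
-- equal runs, reading each face's multiplicity off as a run length (objective: alternative).

-- ===== PORT A =====
-- literal port of A: build Counter(roll), take the set of its count values,
-- and for each set element equal to `number` add every die of roll to Total.
def num_of_a_kind (roll : List Int) (number : Int) : Int :=
  let Total : Int := 0
  let c : PySem.Dict Int Int := PySem.Dict.counter roll
  let counts : PySem.Set Int := PySem.Set.ofList c.values
  counts.foldl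
    (fun T i => if i = number then roll.foldl (fun t num => t + num) T else T)
    Total

-- ===== PORT B =====
-- inner 'while j < len(s) and s[j] == s[i]: j += 1' of Source B (indices stay in range in B)
def pvRunLen (s : List Int) (i : Nat) (j : Nat) : Nat :=
  if _h : j < s.length ∧ s.getD j 0 = s.getD i 0 then pvRunLen s i (j + 1) else j
termination_by s.length - j

theorem pvRunLen_ge (s : List Int) (i : Nat) (j : Nat) : j ≤ pvRunLen s i j := by
  fun_induction pvRunLen s i j with
  | case1 _ _ ih => omega
  | case2 => omega

-- outer 'while i < len(s):' loop of Source B, with 'i = j' as the recursive call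
def pvWalkIdx (roll : List Int) (number : Int) (s : List Int) (i : Nat) : Int :=
  if hi : i < s.length then
    let j := pvRunLen s i (i + 1)
    if ((j - i : Nat) : Int) = number then roll.sum
    else pvWalkIdx roll number s j
  else 0
termination_by s.length - i
decreasing_by
  have h1 : i + 1 ≤ pvRunLen s i (i + 1) := pvRunLen_ge _ _ _
  omega

-- port of B: sort the roll, then walk runs of equal values by index
def num_of_a_kind_alt (roll : List Int) (number : Int) : Int :=
  pvWalkIdx roll number (PySem.List.sorted roll (fun x => x) false) 0

-- ===== PRECONDITION & SPEC =====
def Spec_num_of_a_kind (roll : List Int) (number : Int) (out : Int) : Prop := out = num_of_a_kind_alt roll number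
instance (roll : List Int) (number : Int) (out : Int) : Decidable (Spec_num_of_a_kind roll number out) := by unfold Spec_num_of_a_kind; infer_instance

-- ===== CLAIM (what is proved, stated in full; the proofs are below) =====
def Claim_equal_num_of_a_kind : Prop := ∀ (roll : List Int) (number : Int), Dom_num_of_a_kind roll number → Spec_num_of_a_kind roll number (num_of_a_kind roll number)

-- ===== LEMMAS AND PROOFS =====

-- inner 'for num in roll: Total += num' adds roll.sum once
theorem foldl_add_sum (roll : List Int) (T : Int) :
    roll.foldl (fun t num => t + num) T = T + roll.sum := by
  have h := PySem.List.foldl_add (l := roll) (a := T) (g := fun x => x)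
  simpa using h

-- A's outer loop adds roll.sum once per occurrence of `number` in the iterated list
theorem foldl_count_mul (number : Int) (roll : List Int) (l : List Int) (a : Int) :
    l.foldl (fun T i => if i = number then roll.foldl (fun t num => t + num) T else T) a
      = a + (l.count number : Int) * roll.sum := by
  induction l generalizing a with
  | nil => simp
  | cons x xs ih =>
    simp only [List.foldl_cons, ih, List.count_cons]
    by_cases h : x = number
    · subst h
      simp [foldl_add_sum]
      ring
    · simp [h]

-- A computes: sum(roll) if some multiplicity equals `number`, else 0
theorem numA_eq (roll : List Int) (number : Int) :
    num_of_a_kind roll number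
      = if ∃ x ∈ roll, (roll.count x : Int) = number then roll.sum else 0 := by
  unfold num_of_a_kind
  simp only [foldl_count_mul]
  set l : List Int := (PySem.Set.ofList (PySem.Dict.counter roll).values : List Int) with hl
  have hmem : number ∈ l ↔ ∃ x ∈ roll, (roll.count x : Int) = number := by
    rw [hl, PySem.Set.mem_ofList]
    have hv : (PySem.Dict.counter roll).values
        = (PySem.Set.ofList roll).map (fun k => (roll.count k : Int)) := by
      show ((PySem.Dict.counter roll).items).map (·.2) = _
      rw [PySem.Dict.items_counter]
      simp
    rw [hv]
    simp [PySem.Set.mem_ofList, eq_comm]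
  have hnd : l.Nodup := PySem.Set.nodup_ofList _
  by_cases h : ∃ x ∈ roll, (roll.count x : Int) = number
  · have hin : number ∈ l := hmem.mpr h
    have hc : l.count number = 1 := List.count_eq_one_of_mem hnd hin
    rw [hc, if_pos h]
    simp
  · have hin : number ∉ l := fun hx => h (hmem.mp hx)
    have hc : l.count number = 0 := List.count_eq_zero.mpr hin
    rw [hc, if_neg h]
    simp

-- proof-layer helper: the list-level run walk (pvWalkIdx viewed on the suffix s.drop i)
def pvWalk (roll : List Int) (number : Int) (s : List Int) : Int :=
  match s with
  | [] => 0
  | v :: t =>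
    let k := pvRunLen (v :: t) 0 1
    if (k : Int) = number then roll.sum
    else pvWalk roll number ((v :: t).drop k)
termination_by s.length
decreasing_by
  have h1 : 1 ≤ pvRunLen (v :: t) 0 1 := pvRunLen_ge _ _ _
  simp [List.length_drop]
  omega

-- the inner while loop measures the leading run of s[i]-values from index j
theorem pvRunLen_eq (s : List Int) (i : Nat) (k : Nat) :
    pvRunLen s i k = k + ((s.drop k).takeWhile (fun x => x = s.getD i 0)).length := by
  fun_induction pvRunLen s i k with
  | case1 k h ih =>
    have hk : k < s.length := h.1
    rw [ih, List.drop_eq_getElem_cons hk]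
    have hg : s[k] = s.getD k 0 := (List.getD_eq_getElem s 0 hk).symm
    rw [List.takeWhile_cons, hg, if_pos (by simpa [List.getD] using h.2)]
    simp
    omega
  | case2 k h =>
    by_cases hk : k < s.length
    · have hne : ¬ s.getD k 0 = s.getD i 0 := fun he => h ⟨hk, he⟩
      rw [List.drop_eq_getElem_cons hk]
      have hg : s[k] = s.getD k 0 := (List.getD_eq_getElem s 0 hk).symm
      rw [List.takeWhile_cons, hg, if_neg (by simpa [List.getD] using hne)]
      simp
    · rw [List.drop_eq_nil_of_le (by omega)]
      simp

-- in a sorted list v :: t, everything past the leading run of v is strictly greater than v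
theorem sorted_dropWhile_gt (v : Int) (t : List Int) (hp : (v :: t).Pairwise (· ≤ ·)) :
    ∀ x ∈ t.dropWhile (fun y => y = v), v < x := by
  induction t with
  | nil => simp
  | cons a t' ih =>
    rw [List.pairwise_cons] at hp
    obtain ⟨hv, hp'⟩ := hp
    rw [List.pairwise_cons] at hp'
    obtain ⟨ha, hp''⟩ := hp'
    by_cases hav : a = v
    · subst hav
      rw [List.dropWhile_cons]
      simp only [decide_eq_true_eq]
      exact ih (List.pairwise_cons.mpr ⟨fun x hx => le_trans (hv a (by simp)) (ha x hx), hp''⟩)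
    · rw [List.dropWhile_cons]
      simp only [decide_eq_true_eq, if_neg hav]
      intro x hx
      have hva : v < a := lt_of_le_of_ne (hv a (by simp)) (fun he => hav he.symm)
      rcases List.mem_cons.mp hx with rfl | hx'
      · exact hva
      · exact lt_of_lt_of_le hva (ha x hx')

-- the walk over the sorted list returns sum(roll) iff some multiplicity equals number
theorem pvWalk_eq (roll : List Int) (number : Int) :
    ∀ (n : Nat) (s : List Int), s.length ≤ n → s.Pairwise (· ≤ ·) →
      pvWalk roll number s
        = if ∃ x ∈ s, (s.count x : Int) = number then roll.sum else 0 := by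
  intro n
  induction n with
  | zero =>
    intro s hs _
    have : s = [] := List.eq_nil_of_length_eq_zero (by omega)
    subst this
    simp [pvWalk]
  | succ m ih =>
    intro s hs hp
    match s with
    | [] => simp [pvWalk]
    | v :: t =>
      rw [pvWalk]
      have hk : pvRunLen (v :: t) 0 1 = 1 + (t.takeWhile (fun x => x = v)).length := by
        rw [pvRunLen_eq]
        simp
      set tw := t.takeWhile (fun x => x = v) with htw
      set dw := t.dropWhile (fun x => x = v) with hdw
      have hsplit : t = tw ++ dw := (List.takeWhile_append_dropWhile).symm
      have hdrop : (v :: t).drop (pvRunLen (v :: t) 0 1) = dw := by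
        rw [hk]
        show (v :: t).drop (1 + tw.length) = dw
        have : (v :: t).drop (1 + tw.length) = t.drop tw.length := by
          rw [Nat.add_comm]
          simp [List.drop_succ_cons]
        rw [this, hsplit, List.drop_left]
      have hgt : ∀ x ∈ dw, v < x := sorted_dropWhile_gt v t hp
      have htw_all : ∀ x ∈ tw, x = v := fun x hx => by
        have := List.mem_takeWhile_imp (htw ▸ hx)
        simpa using this
      -- count of v in v :: t is 1 + |tw|
      have hcv : (v :: t).count v = 1 + tw.length := by
        rw [List.count_cons_self, hsplit, List.count_append]
        have h1 : tw.count v = tw.length :=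
          List.count_eq_length.mpr (fun b hb => (htw_all b hb).symm)
        have h2 : dw.count v = 0 :=
          List.count_eq_zero.mpr (fun hv => absurd rfl (ne_of_gt (hgt v hv)))
        omega
      -- counts of x ≠ v agree between v :: t and dw
      have hcx : ∀ x, x ≠ v → (v :: t).count x = dw.count x := by
        intro x hx
        have hcc : (v :: t).count x = t.count x := by
          simp [Ne.symm hx]
        rw [hcc, hsplit, List.count_append]
        have h1 : tw.count x = 0 :=
          List.count_eq_zero.mpr (fun hv => hx (htw_all x hv))
        omega
      have hpdw : dw.Pairwise (· ≤ ·) := by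
        have := (List.pairwise_cons.mp hp).2
        rw [hsplit] at this
        exact (List.pairwise_append.mp this).2.1
      have hcond : (∃ x ∈ (v :: t), ((v :: t).count x : Int) = number)
          ↔ ((1 + tw.length : Nat) : Int) = number ∨ ∃ x ∈ dw, (dw.count x : Int) = number := by
        constructor
        · rintro ⟨x, hx, hcnt⟩
          by_cases hxv : x = v
          · subst hxv
            left
            rw [← hcnt, hcv]
          · right
            refine ⟨x, ?_, by rw [← hcx x hxv]; exact hcnt⟩
            rcases List.mem_cons.mp hx with rfl | hxt
            · exact absurd rfl hxv
            · rw [hsplit] at hxt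
              rcases List.mem_append.mp hxt with h1 | h2
              · exact absurd (htw_all x h1) hxv
              · exact h2
        · rintro (h | ⟨x, hx, hcnt⟩)
          · exact ⟨v, by simp, by rw [hcv]; exact_mod_cast h⟩
          · have hxv : x ≠ v := ne_of_gt (hgt x hx)
            refine ⟨x, ?_, by rw [hcx x hxv]; exact hcnt⟩
            exact List.mem_cons_of_mem v (hsplit ▸ List.mem_append_right tw hx)
      by_cases hif : ((pvRunLen (v :: t) 0 1 : Nat) : Int) = number
      · rw [if_pos hif]
        have : ∃ x ∈ (v :: t), ((v :: t).count x : Int) = number :=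
          hcond.mpr (Or.inl (by rw [← hk]; exact_mod_cast hif))
        rw [if_pos this]
      · rw [if_neg hif]
        have hdwlen : dw.length ≤ m := by
          have h1 : dw.length ≤ t.length := by
            rw [hsplit]; simp
          simp at hs
          omega
        rw [hdrop, ih dw hdwlen hpdw]
        have hnum : ¬ (((1 + tw.length : Nat) : Int) = number) := by
          rw [← hk]
          exact_mod_cast hif
        by_cases h2 : ∃ x ∈ dw, (dw.count x : Int) = number
        · rw [if_pos h2, if_pos (hcond.mpr (Or.inr h2))]
        · rw [if_neg h2, if_neg (fun hc => (hcond.mp hc).elim hnum h2)]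

-- the index walk is the list walk on the corresponding suffix
theorem pvWalkIdx_eq_pvWalk (roll : List Int) (number : Int) :
    ∀ (n : Nat) (s : List Int) (i : Nat), s.length - i ≤ n →
      pvWalkIdx roll number s i = pvWalk roll number (s.drop i) := by
  intro n
  induction n with
  | zero =>
    intro s i h
    have hi : ¬ i < s.length := by omega
    rw [pvWalkIdx, dif_neg hi, List.drop_eq_nil_of_le (by omega), pvWalk]
  | succ m ih =>
    intro s i h
    by_cases hi : i < s.length
    · rw [pvWalkIdx, dif_pos hi]
      obtain ⟨v, t, hvt⟩ : ∃ v t, s.drop i = v :: t :=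
        ⟨s[i], s.drop (i + 1), List.drop_eq_getElem_cons hi⟩
      rw [hvt, pvWalk]
      have hdrop1 : t = s.drop (i + 1) := by
        have := List.drop_eq_getElem_cons hi
        rw [hvt] at this
        exact (List.cons.injEq .. ▸ this).2
      have hvi : s[i] = v := by
        have h0 := List.drop_eq_getElem_cons hi
        rw [hvt] at h0
        exact (List.cons.injEq .. ▸ h0).1.symm
      have hv0 : (s.drop i).getD 0 0 = s.getD i 0 := by
        rw [hvt, List.getD_cons_zero, List.getD_eq_getElem s 0 hi, hvi]
      have hrun : pvRunLen s i (i + 1) = i + pvRunLen (v :: t) 0 1 := by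
        rw [pvRunLen_eq s i (i + 1), pvRunLen_eq (v :: t) 0 1]
        have h1 : (v :: t).drop 1 = s.drop (i + 1) := by simp [hdrop1]
        have h2 : (v :: t).getD 0 0 = s.getD i 0 := by rw [← hvt]; exact hv0
        rw [h1, h2]
        omega
      show (if ((pvRunLen s i (i + 1) - i : Nat) : Int) = number then roll.sum
              else pvWalkIdx roll number s (pvRunLen s i (i + 1))) = _
      have hsub : pvRunLen s i (i + 1) - i = pvRunLen (v :: t) 0 1 := by
        rw [hrun]; omega
      rw [hsub, hrun]
      by_cases hc : ((pvRunLen (v :: t) 0 1 : Nat) : Int) = number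
      · rw [if_pos hc, if_pos hc]
      · rw [if_neg hc, if_neg hc]
        have hlen : s.length - (i + pvRunLen (v :: t) 0 1) ≤ m := by
          have := pvRunLen_ge (v :: t) 0 1
          omega
        rw [ih s (i + pvRunLen (v :: t) 0 1) hlen, ← hvt]
        congr 1
        rw [List.drop_drop, Nat.add_comm]
    · rw [pvWalkIdx, dif_neg hi, List.drop_eq_nil_of_le (by omega), pvWalk]

-- B computes the same closed form
theorem numB_eq (roll : List Int) (number : Int) :
    num_of_a_kind_alt roll number
      = if ∃ x ∈ roll, (roll.count x : Int) = number then roll.sum else 0 := by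
  unfold num_of_a_kind_alt
  set s := PySem.List.sorted roll (fun x => x) false with hsdef
  rw [pvWalkIdx_eq_pvWalk roll number s.length s 0 (by omega), List.drop_zero]
  have hperm : s.Perm roll := PySem.List.sorted_perm roll (fun x => x) false
  have hp : s.Pairwise (· ≤ ·) := by
    have := PySem.List.sorted_pairwise (xs := roll) (key := fun x => x)
    simpa using this
  rw [pvWalk_eq roll number s.length s le_rfl hp]
  congr 1
  · apply propext
    constructor
    · rintro ⟨x, hx, hc⟩
      exact ⟨x, hperm.mem_iff.mp hx, by rw [← hperm.count_eq]; exact hc⟩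
    · rintro ⟨x, hx, hc⟩
      exact ⟨x, hperm.mem_iff.mpr hx, by rw [hperm.count_eq]; exact hc⟩

-- ===== VERDICT (by name: the statement is the Claim_ definition above) =====
theorem num_of_a_kind_spec : Claim_equal_num_of_a_kind := by
  intro roll number _
  unfold Spec_num_of_a_kind
  rw [numA_eq, numB_eq]
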